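-- pv_equiv track=rewrite | github.com/alexeybutyrev/leetcode-solutions | solutions/Append K Integers With Minimal Sum/solution.py | minimalKSum
-- ===== SOURCE A (Python) =====
-- from typing import List
--
-- def minimalKSum(A: List[int], k: int) -> int:
--     A = list(set(A))
--     A.sort()
--
--     mn = A[0]
--     ms = A[-1]
--
--
--     if mn > k:
--         return k * (k + 1) // 2
--
--     k -= (mn-1)
--     ans = mn * (mn - 1) // 2
--
--     for i in range(1,len(A)):
--         a = A[i-1]
--         if A[i] == a + 1: continue
--
--         if A[i] - a-1 >= k:
--             return ans + a * k + k*(k + 1) // 2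
--         else:
--             d = A[i] - a-1
--             k -= d
--             ans += a * d + d*(d + 1) // 2
--
--     return ans + ms * k + k*(k + 1) // 2
-- ===== SOURCE B (Python) =====
-- def minimalKSum(A, k):
--     ans = k * (k + 1) // 2
--     for x in sorted(set(A)):
--         if x <= k:
--             ans += (k + 1) - x
--             k += 1
--     return ans
-- ===== Notes on version B (the rewrite author's own statement) =====
-- stated objective: simpler
-- what changed: Replaced A's per-gap arithmetic-series accumulation with early returns by a single running-boundary fold: start from k*(k+1)//2 and, for each sorted unique element x <= k (live k), swap x for the next boundary value k+1 and grow k.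
import Mathlib
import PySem

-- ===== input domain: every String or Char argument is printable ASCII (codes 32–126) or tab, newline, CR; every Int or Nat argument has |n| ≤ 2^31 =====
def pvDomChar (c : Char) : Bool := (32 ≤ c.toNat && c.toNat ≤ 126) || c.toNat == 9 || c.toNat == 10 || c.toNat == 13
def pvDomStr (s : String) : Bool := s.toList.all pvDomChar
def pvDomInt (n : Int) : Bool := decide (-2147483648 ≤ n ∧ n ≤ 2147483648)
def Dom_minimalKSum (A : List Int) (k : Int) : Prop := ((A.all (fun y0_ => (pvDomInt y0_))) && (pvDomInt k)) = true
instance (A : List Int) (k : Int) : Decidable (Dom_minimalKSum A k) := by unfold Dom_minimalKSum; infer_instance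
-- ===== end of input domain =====

-- B replaces A's per-gap arithmetic-series accumulation (with early returns) by a single
-- running-boundary fold: simpler, same O(n log n) cost; equivalence of RETURN values is proved.

-- ===== PORT A =====
-- A's for-loop over i in range(1, len(A)) reading the adjacent pair (A[i-1], A[i]),
-- with its two early returns, transcribed as structural recursion on (prev, rest).
def minimalKSumLoopA (ms : Int) : Int → List Int → Int → Int → Int
  | _, [], k, ans => ans + ms * k + PySem.Int.floordiv (k * (k + 1)) 2
  | a, b :: t, k, ans =>
    if b = a + 1 then minimalKSumLoopA ms b t k ans
    else if b - a - 1 ≥ k then ans + a * k + PySem.Int.floordiv (k * (k + 1)) 2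
    else minimalKSumLoopA ms b t (k - (b - a - 1))
        (ans + a * (b - a - 1) + PySem.Int.floordiv ((b - a - 1) * ((b - a - 1) + 1)) 2)

def minimalKSum (A : List Int) (k : Int) : Int :=
  let L := PySem.List.sorted (PySem.Set.ofList A) (fun x => x) false
  let mn := PySem.List.pyGetD L 0 0      -- A[0]; IndexError on empty A is excluded by Pre_
  let ms := PySem.List.pyGetD L (-1) 0   -- A[-1]
  if mn > k then PySem.Int.floordiv (k * (k + 1)) 2
  else
    match L with
    | [] => 0  -- unreachable under Pre_ (L = [] only for A = [])
    | a :: t => minimalKSumLoopA ms a t (k - (mn - 1)) (PySem.Int.floordiv (mn * (mn - 1)) 2)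

-- ===== PORT B =====
def minimalKSumLoopB : List Int → Int → Int → Int
  | [], _, ans => ans
  | x :: t, k, ans => if x ≤ k then minimalKSumLoopB t (k + 1) (ans + (k + 1) - x)
                      else minimalKSumLoopB t k ans

def minimalKSum_alt (A : List Int) (k : Int) : Int :=
  minimalKSumLoopB (PySem.List.sorted (PySem.Set.ofList A) (fun x => x) false) k
    (PySem.Int.floordiv (k * (k + 1)) 2)

-- ===== PRECONDITION & SPEC =====
-- Pre_ excludes only the empty list, on which A raises IndexError at A[0].
def Pre_minimalKSum (A : List Int) (k : Int) : Prop := A ≠ []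
instance (A : List Int) (k : Int) : Decidable (Pre_minimalKSum A k) := by
  unfold Pre_minimalKSum; infer_instance

def pvWitness_minimalKSum : List Int × Int := ([1, 3], 2)

def Spec_minimalKSum (A : List Int) (k : Int) (out : Int) : Prop := out = minimalKSum_alt A k
instance (A : List Int) (k : Int) (out : Int) : Decidable (Spec_minimalKSum A k out) := by
  unfold Spec_minimalKSum; infer_instance

-- ===== CLAIM (what is proved, stated in full; the proofs are below) =====
def Claim_equal_minimalKSum : Prop := ∀ (A : List Int) (k : Int), Dom_minimalKSum A k → Pre_minimalKSum A k → Spec_minimalKSum A k (minimalKSum A k)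

-- ===== LEMMAS AND PROOFS =====

-- m*(m+1) is even, so the Python floor-division // 2 is exact.
lemma two_fd (m : Int) : 2 * PySem.Int.floordiv (m * (m + 1)) 2 = m * (m + 1) := by
  rw [PySem.Int.floordiv_eq_ediv_of_pos (by norm_num)]
  exact Int.mul_ediv_cancel' (Int.even_mul_succ_self m).two_dvd

lemma two_fd' (m : Int) : 2 * PySem.Int.floordiv (m * (m - 1)) 2 = m * (m - 1) := by
  have h : m * (m - 1) = (m - 1) * ((m - 1) + 1) := by ring
  rw [h]; exact two_fd (m - 1)

-- If every remaining element exceeds the boundary, B's loop changes nothing.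
lemma loopB_const : ∀ (t : List Int) (k ans : Int), (∀ x ∈ t, k < x) →
    minimalKSumLoopB t k ans = ans
  | [], _, _, _ => rfl
  | x :: t, k, ans, h => by
    have hx := h x (by simp)
    simp only [minimalKSumLoopB, if_neg (by omega : ¬ x ≤ k)]
    exact loopB_const t k ans (fun y hy => h y (by simp [hy]))

lemma step_arith (ansA a b K F1 F2 F3 : Int) (h1 : 2 * F1 = (b - a - 1) * ((b - a - 1) + 1))
    (h2 : 2 * F2 = (K - (b - a - 1)) * ((K - (b - a - 1)) + 1)) (h3 : 2 * F3 = K * (K + 1)) :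
    ansA + a * (b - a - 1) + F1 + b * (K - (b - a - 1)) + F2 = ansA + a * K + F3 + (a + K + 1) - b := by
  have h : 2 * (ansA + a * (b - a - 1) + F1 + b * (K - (b - a - 1)) + F2)
      = 2 * (ansA + a * K + F3 + (a + K + 1) - b) := by
    linear_combination h1 + h2 - h3
  linarith

-- The bridge invariant: A's gap loop in state (prev = a, k, ans) computes what B's
-- boundary loop computes in state (boundary = a + k, ans + a*k + k*(k+1)//2).
lemma bridge (ms : Int) : ∀ (t : List Int) (a kA ansA : Int), 1 ≤ kA →
    (a :: t).Pairwise (· < ·) → ms = (a :: t).getLast (by simp) →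
    minimalKSumLoopA ms a t kA ansA
      = minimalKSumLoopB t (a + kA) (ansA + a * kA + PySem.Int.floordiv (kA * (kA + 1)) 2)
  | [], a, kA, ansA, _, _, hms => by
    simp only [List.getLast_singleton] at hms
    simp [minimalKSumLoopA, minimalKSumLoopB, hms]
  | b :: t', a, kA, ansA, hk, hp, hms => by
    have hab : a < b := (List.pairwise_cons.1 hp).1 b (by simp)
    have hp' : (b :: t').Pairwise (· < ·) := (List.pairwise_cons.1 hp).2
    have hms' : ms = (b :: t').getLast (by simp) := by
      rwa [List.getLast_cons (by simp)] at hms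
    by_cases hcont : b = a + 1
    · -- adjacent elements: A skips, B swaps b for the next boundary
      rw [minimalKSumLoopA, if_pos hcont,
        bridge ms t' b kA ansA hk hp' hms',
        minimalKSumLoopB, if_pos (by omega : b ≤ a + kA)]
      have : b + kA = a + kA + 1 := by omega
      rw [this]
      congr 1
      subst hcont; ring
    · by_cases hbig : b - a - 1 ≥ kA
      · -- gap at least k: A returns early, B skips every remaining element
        rw [minimalKSumLoopA, if_neg hcont, if_pos hbig,
          minimalKSumLoopB, if_neg (by omega : ¬ b ≤ a + kA),
          loopB_const t' (a + kA) _ (fun x hx => by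
            have := List.rel_of_pairwise_cons hp' hx; omega)]
      · -- gap d < k: A consumes the gap, B swaps b for the next boundary
        rw [minimalKSumLoopA, if_neg hcont, if_neg hbig,
          bridge ms t' b (kA - (b - a - 1)) _ (by omega) hp' hms',
          minimalKSumLoopB, if_pos (by omega : b ≤ a + kA),
          (by omega : b + (kA - (b - a - 1)) = a + kA + 1)]
        congr 1
        exact step_arith ansA a b kA _ _ _ (two_fd _) (two_fd _) (two_fd _)

lemma head_arith (m k F1 F2 F3 : Int) (h1 : 2 * F1 = m * (m - 1))
    (h2 : 2 * F2 = (k - (m - 1)) * ((k - (m - 1)) + 1)) (h3 : 2 * F3 = k * (k + 1)) :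
    F1 + m * (k - (m - 1)) + F2 = F3 + (k + 1) - m := by
  have h : 2 * (F1 + m * (k - (m - 1)) + F2) = 2 * (F3 + (k + 1) - m) := by
    linear_combination h1 + h2 - h3
  linarith

-- ===== VERDICT (by name: the statement is the Claim_ definition above) =====
theorem minimalKSum_spec : Claim_equal_minimalKSum := by
  intro A k _ hpre
  unfold Spec_minimalKSum minimalKSum minimalKSum_alt
  obtain ⟨m, t, hL⟩ : ∃ m t, PySem.List.sorted (PySem.Set.ofList A) (fun x => x) false = m :: t := by
    cases hs : PySem.List.sorted (PySem.Set.ofList A) (fun x => x) false with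
    | nil =>
      exfalso
      have h0 : PySem.Set.ofList A = [] := (PySem.List.sorted_eq_nil_iff _ _ _).1 hs
      obtain ⟨a, A', rfl⟩ := List.exists_cons_of_ne_nil hpre
      have ha : a ∈ PySem.Set.ofList (a :: A') := (PySem.Set.mem_ofList _ _).2 (by simp)
      simp [h0] at ha
    | cons m t => exact ⟨m, t, rfl⟩
  have hp : (m :: t).Pairwise (· < ·) := by
    have := PySem.List.sorted_ofList_pairwise_lt (xs := A)
    rwa [hL] at this
  rw [hL]
  dsimp only
  rw [PySem.List.pyGetD_zero_cons]
  have hms : PySem.List.pyGetD (m :: t) (-1) 0 = (m :: t).getLast (by simp) :=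
    PySem.List.pyGetD_neg_one (m :: t) 0 (by simp)
  rw [hms]
  by_cases hmk : m > k
  · rw [if_pos hmk, minimalKSumLoopB, if_neg (by omega : ¬ m ≤ k),
      loopB_const t k _ (fun x hx => by have := List.rel_of_pairwise_cons hp hx; omega)]
  · rw [if_neg hmk,
      bridge ((m :: t).getLast (by simp)) t m (k - (m - 1)) _ (by omega) hp rfl,
      minimalKSumLoopB, if_pos (by omega : m ≤ k),
      (by omega : m + (k - (m - 1)) = k + 1)]
    congr 1
    exact head_arith m k _ _ _ (two_fd' m) (two_fd _) (two_fd _)
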